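-- pv_equiv track=rewrite | github.com/thnikk/pybar | modules/weather.py | aqi_to_desc
-- ===== SOURCE A (Python) =====
-- def aqi_to_desc(value) -> str:
--     """ Get description for aqi """
--     for desc in [
--         (50, "Good"), (100, "Moderate"), (150, "Unhealthy"),
--         (200, "Unhealthy"), (300, "Very unhealthy"), (500, "Hazardous")
--     ]:
--         if 0 < value < desc[0]:
--             return desc[1]
--     return "Unknown"
-- ===== SOURCE B (Python) =====
-- import bisect
--
-- CUTS = [50, 100, 150, 200, 300, 500]
-- LABELS = ["Good", "Moderate", "Unhealthy", "Unhealthy", "Very unhealthy", "Hazardous"]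
--
--
-- def aqi_to_desc(value) -> str:
--     """ Get description for aqi """
--     if not (value > 0):
--         return "Unknown"
--     i = bisect.bisect_right(CUTS, value)
--     return LABELS[i] if i < len(CUTS) else "Unknown"
-- ===== Notes on version B (the rewrite author's own statement) =====
-- stated objective: idiomatic
-- what changed: Replaces the linear scan over (cutoff, label) pairs by a positivity guard plus bisect_right binary search into a sorted cutoff table with a parallel label table.
import Mathlib
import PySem

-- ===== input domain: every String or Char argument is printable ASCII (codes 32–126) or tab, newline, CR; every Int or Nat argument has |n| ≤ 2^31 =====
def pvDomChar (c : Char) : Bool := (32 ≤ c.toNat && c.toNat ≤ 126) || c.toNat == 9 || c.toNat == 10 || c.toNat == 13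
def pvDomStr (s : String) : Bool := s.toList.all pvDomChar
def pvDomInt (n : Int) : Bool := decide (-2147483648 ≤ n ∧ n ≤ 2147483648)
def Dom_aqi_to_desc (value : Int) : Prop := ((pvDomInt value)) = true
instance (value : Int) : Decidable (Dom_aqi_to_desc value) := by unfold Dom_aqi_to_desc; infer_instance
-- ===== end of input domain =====

-- B replaces A's linear scan of the cutoff/label pairs by a guard plus a
-- binary search (bisect_right) into a sorted cutoff table; objective: idiomatic.

-- ===== PORT A =====
-- A's for-loop with early return, as structural recursion over the pair list.
def aqiLoop (value : Int) : List (Int × String) → String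
  | [] => "Unknown"
  | d :: rest => if 0 < value ∧ value < d.1 then d.2 else aqiLoop value rest

def aqi_to_desc (value : Int) : String :=
  aqiLoop value
    [(50, "Good"), (100, "Moderate"), (150, "Unhealthy"),
     (200, "Unhealthy"), (300, "Very unhealthy"), (500, "Hazardous")]

-- ===== PORT B =====
def pvCuts : List Int := [50, 100, 150, 200, 300, 500]
def pvLabels : List String :=
  ["Good", "Moderate", "Unhealthy", "Unhealthy", "Very unhealthy", "Hazardous"]

-- bisect.bisect_right's standard lo/hi binary-search loop (index always in range,
-- so getD's default is never used).
def bisectRightLoop (a : List Int) (x : Int) (lo hi : Nat) : Nat :=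
  if _h : lo < hi then
    let mid := (lo + hi) / 2
    if x < a.getD mid 0 then bisectRightLoop a x lo mid
    else bisectRightLoop a x (mid + 1) hi
  else lo
termination_by hi - lo
decreasing_by all_goals omega

def aqi_to_desc_alt (value : Int) : String :=
  if ¬ (value > 0) then "Unknown"
  else
    let i := bisectRightLoop pvCuts value 0 pvCuts.length
    if i < pvCuts.length then pvLabels.getD i "Unknown" else "Unknown"

-- ===== PRECONDITION & SPEC =====
def Spec_aqi_to_desc (value : Int) (out : String) : Prop := out = aqi_to_desc_alt value
instance (value : Int) (out : String) : Decidable (Spec_aqi_to_desc value out) := by unfold Spec_aqi_to_desc; infer_instance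

-- ===== CLAIM (what is proved, stated in full; the proofs are below) =====
def Claim_equal_aqi_to_desc : Prop := ∀ (value : Int), Dom_aqi_to_desc value → Spec_aqi_to_desc value (aqi_to_desc value)

-- ===== LEMMAS AND PROOFS =====
theorem bisectRightLoop_eval (x : Int) :
    bisectRightLoop [50, 100, 150, 200, 300, 500] x 0 6 =
      if x < 200 then
        (if x < 100 then (if x < 50 then 0 else 1) else (if x < 150 then 2 else 3))
      else (if x < 500 then (if x < 300 then 4 else 5) else 6) := by
  repeat rw [bisectRightLoop]; norm_num

-- ===== VERDICT (by name: the statement is the Claim_ definition above) =====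
theorem aqi_to_desc_spec : Claim_equal_aqi_to_desc := by
  intro value _
  unfold Spec_aqi_to_desc aqi_to_desc aqi_to_desc_alt
  simp only [aqiLoop]
  norm_num [pvCuts, pvLabels, bisectRightLoop_eval]
  split_ifs <;> simp_all <;> omega
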